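-- pv_equiv track=rewrite | github.com/funmagster/Learn_Algorithms | Courses/Yandex handbook/7 Divide and rule/7.2 Search for the dominant element/B.py | find_three_dimensional_elements
-- ===== SOURCE A (Python) =====
-- def find_three_dimensional_elements(mas, n):
--     count = 0
--     dict_elem = {}
--     if n == 3:
--         return int(mas[0] != mas[1] and mas[0] != mas[2] and mas[1] != mas[0])
--     elif n < 5:
--         return 0
--     for elem in mas:
--         if elem in dict_elem:
--             dict_elem[elem] += 1
--             if dict_elem[elem] == n // 4 + 1:
--                 count += 1
--         else:
--             dict_elem[elem] = 1
--     return int(count == 3)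
-- ===== SOURCE B (Python) =====
-- def find_three_dimensional_elements(mas, n):
--     if n == 3:
--         return int(len(set(mas[:3])) == 3)
--     if n < 5:
--         return 0
--     s = sorted(mas)
--     heavy = 0
--     i = 0
--     while i < len(s):
--         j = i + 1
--         while j < len(s) and s[j] == s[i]:
--             j += 1
--         if j - i > n // 4:
--             heavy += 1
--         i = j
--     return int(heavy == 3)
-- ===== Notes on version B (the rewrite author's own statement) =====
-- stated objective: alternative
-- what changed: B replaces A's hash-table counting with inline threshold-crossing tally by a sort-then-scan algorithm: it sorts the list and walks it once with two indices, measuring each maximal run of equal elements and counting runs longer than n//4; the n==3 guard becomes a distinct-count of the first three elements, fixing A's duplicated comparison.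
-- intended difference: When n == 3, len(mas) >= 3, mas[0] differs from mas[1] and mas[2] but mas[1] == mas[2], A returns 1 because its condition repeats mas[1] != mas[0] instead of testing mas[1] != mas[2]; B returns 0, the intended 'all three distinct' answer. — e.g. on find_three_dimensional_elements([1, 2, 2], 3): A returns 1, B returns 0
import Mathlib
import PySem

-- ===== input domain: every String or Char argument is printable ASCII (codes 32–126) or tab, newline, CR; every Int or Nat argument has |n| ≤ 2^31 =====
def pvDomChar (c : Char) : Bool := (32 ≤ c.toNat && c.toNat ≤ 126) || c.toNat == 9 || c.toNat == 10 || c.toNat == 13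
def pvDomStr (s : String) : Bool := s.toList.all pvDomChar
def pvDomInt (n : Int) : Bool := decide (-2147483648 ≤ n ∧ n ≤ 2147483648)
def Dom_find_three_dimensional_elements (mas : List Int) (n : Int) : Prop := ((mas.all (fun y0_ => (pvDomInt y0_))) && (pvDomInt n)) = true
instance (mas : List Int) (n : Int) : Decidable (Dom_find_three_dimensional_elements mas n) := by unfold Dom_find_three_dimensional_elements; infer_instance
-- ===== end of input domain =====

-- B sorts the list and counts maximal runs longer than n//4 in one scan over the sorted list
-- (A hash-counts with an inline threshold-crossing tally); B's n==3 guard counts distinct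
-- elements among the first three, fixing A's duplicated comparison (see D_ below).

-- ===== PORT A =====
def find_three_dimensional_elements (mas : List Int) (n : Int) : Int :=
  -- count = 0; dict_elem = {}
  if n = 3 then
    -- int(mas[0] != mas[1] and mas[0] != mas[2] and mas[1] != mas[0]), with Python's
    -- short-circuit 'and'; a 'none' (IndexError) is excluded by Pre_ and mapped to 0 here
    match PySem.List.pyGet? mas 0, PySem.List.pyGet? mas 1 with
    | some m0, some m1 =>
      if m0 ≠ m1 then
        match PySem.List.pyGet? mas 2 with
        | some m2 => if m0 ≠ m2 then (if m1 ≠ m0 then 1 else 0) else 0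
        | none => 0
      else 0
    | _, _ => 0
  else if n < 5 then 0
  else
    let res := mas.foldl (fun (st : Int × PySem.Dict Int Int) elem =>
      if st.2.contains elem then
        let d' := st.2.modify elem 0 (· + 1)        -- dict_elem[elem] += 1
        if d'.getD elem 0 = PySem.Int.floordiv n 4 + 1 then (st.1 + 1, d') else (st.1, d')
      else (st.1, st.2.insert elem 1)) (0, PySem.Dict.empty)
    if res.1 = 3 then 1 else 0

-- ===== PORT B =====
-- Source B's outer while loop over the sorted list: the inner 'while j < len(s) and s[j] == s[i]'
-- measures the current run (= takeWhile on the tail) and 'i = j' jumps past it (= dropWhile);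
-- exact step-for-step rendering of that index walk as recursion on the remaining suffix.
def pvRunCount (thr : Int) : List Int → Int
  | [] => 0
  | x :: rest =>
      let run := (rest.takeWhile (fun y => y == x)).length + 1   -- j - i
      (if thr < (run : Int) then 1 else 0) + pvRunCount thr (rest.dropWhile (fun y => y == x))
termination_by l => l.length
decreasing_by
  simpa using Nat.lt_succ_of_le (List.length_dropWhile_le _ _)

def find_three_dimensional_elements_alt (mas : List Int) (n : Int) : Int :=
  if n = 3 then
    -- int(len(set(mas[:3])) == 3)
    if PySem.Set.len (PySem.Set.ofList (PySem.List.slice mas none (some 3))) = 3 then 1 else 0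
  else if n < 5 then 0
  else
    let s := PySem.List.sorted mas (fun x => x) false
    let heavy := pvRunCount (PySem.Int.floordiv n 4) s
    if heavy = 3 then 1 else 0

-- ===== PRECONDITION & SPEC =====
-- Pre_ excludes exactly the inputs where A raises IndexError: n == 3 with fewer than two
-- elements, or exactly two unequal elements (then 'mas[0] != mas[2]' is evaluated).
def Pre_find_three_dimensional_elements (mas : List Int) (n : Int) : Prop :=
  n = 3 → (mas.drop 1 ≠ [] ∧ (mas.getD 0 0 = mas.getD 1 0 ∨ mas.drop 2 ≠ []))
instance (mas : List Int) (n : Int) : Decidable (Pre_find_three_dimensional_elements mas n) := by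
  unfold Pre_find_three_dimensional_elements; infer_instance
def pvWitness_find_three_dimensional_elements : List Int × Int := ([1, 1, 1, 1, 2], 5)

-- When n == 3, len(mas) >= 3, mas[0] differs from mas[1] and mas[2] but mas[1] == mas[2],
-- A returns 1 (its condition repeats 'mas[1] != mas[0]' instead of testing 'mas[1] != mas[2]');
-- B returns 0, the intended 'all three distinct' answer.
def D_find_three_dimensional_elements (mas : List Int) (n : Int) : Prop :=
  n = 3 ∧ mas.drop 2 ≠ [] ∧ mas.getD 0 0 ≠ mas.getD 1 0 ∧ mas.getD 0 0 ≠ mas.getD 2 0 ∧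
    mas.getD 1 0 = mas.getD 2 0
instance (mas : List Int) (n : Int) : Decidable (D_find_three_dimensional_elements mas n) := by
  unfold D_find_three_dimensional_elements; infer_instance

def Spec_find_three_dimensional_elements (mas : List Int) (n : Int) (out : Int) : Prop :=
  ¬ D_find_three_dimensional_elements mas n → out = find_three_dimensional_elements_alt mas n
instance (mas : List Int) (n : Int) (out : Int) : Decidable (Spec_find_three_dimensional_elements mas n out) := by
  unfold Spec_find_three_dimensional_elements; infer_instance

def pvDiffWitness_find_three_dimensional_elements : List Int × Int := ([1, 2, 2], 3)
def pvDiffWitnessOut_find_three_dimensional_elements : Int × Int := (1, 0)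

-- ===== CLAIM (what is proved, stated in full; the proofs are below) =====
def Claim_unchanged_find_three_dimensional_elements : Prop := ∀ (mas : List Int) (n : Int), Dom_find_three_dimensional_elements mas n → Pre_find_three_dimensional_elements mas n → Spec_find_three_dimensional_elements mas n (find_three_dimensional_elements mas n)
def Claim_changed_find_three_dimensional_elements : Prop := Dom_find_three_dimensional_elements (pvDiffWitness_find_three_dimensional_elements.1) (pvDiffWitness_find_three_dimensional_elements.2) ∧ Pre_find_three_dimensional_elements (pvDiffWitness_find_three_dimensional_elements.1) (pvDiffWitness_find_three_dimensional_elements.2) ∧ D_find_three_dimensional_elements (pvDiffWitness_find_three_dimensional_elements.1) (pvDiffWitness_find_three_dimensional_elements.2) ∧ find_three_dimensional_elements (pvDiffWitness_find_three_dimensional_elements.1) (pvDiffWitness_find_three_dimensional_elements.2) = pvDiffWitnessOut_find_three_dimensional_elements.1 ∧ find_three_dimensional_elements_alt (pvDiffWitness_find_three_dimensional_elements.1) (pvDiffWitness_find_three_dimensional_elements.2) = pvDiffWitnessOut_find_three_dimensional_elements.2 ∧ pvDiffWitnessOut_find_three_dimensional_elements.1 ≠ pvDiffWitnessOut_find_t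hree_dimensional_elements.2
def Claim_exact_find_three_dimensional_elements : Prop := ∀ (mas : List Int) (n : Int), Dom_find_three_dimensional_elements mas n → Pre_find_three_dimensional_elements mas n → D_find_three_dimensional_elements mas n → find_three_dimensional_elements mas n ≠ find_three_dimensional_elements_alt mas n

-- ===== LEMMAS AND PROOFS =====

-- countP over a Nodup list when the predicate changes at one member x
theorem pv_countP_shift {l : List Int} (hl : l.Nodup) {x : Int} (hx : x ∈ l) (p q : Int → Bool)
    (h : ∀ y ∈ l, y ≠ x → p y = q y) :
    (l.countP p : Int) = (l.countP q : Int) + (if p x then 1 else 0) - (if q x then 1 else 0) := by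
  have hperm := List.perm_cons_erase hx
  rw [hperm.countP_eq p, hperm.countP_eq q, List.countP_cons, List.countP_cons]
  have hcongr : (l.erase x).countP p = (l.erase x).countP q := by
    refine List.countP_congr ?_
    intro y hy
    rcases (hl.mem_erase_iff).mp hy with ⟨hne, hmem⟩
    rw [h y hmem hne]
  rw [hcongr]
  by_cases hp : p x <;> by_cases hq : q x <;> simp [hp, hq] <;> push_cast <;> ring

-- dropping x from a set does not change countP when the predicate is false at x
theorem pv_countP_discard {s : List Int} {x : Int} {p : Int → Bool} (hpx : p x = false) :
    (PySem.Set.discard s x).countP p = s.countP p := by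
  simp only [PySem.Set.discard, List.countP_filter]
  refine List.countP_congr ?_
  intro y _
  by_cases hyx : y = x
  · subst hyx; simp [hpx]
  · simp [hyx]

-- invariant of A's counting loop: starting from any dict with Nodup keys, the final tally is
-- the crossings contributed by keys already present plus those contributed by fresh keys of l
theorem pv_loopA (t : Int) (ht : 2 ≤ t) (l : List Int) : ∀ (count : Int) (d : PySem.Dict Int Int),
    d.keys.Nodup →
    (List.foldl (fun (st : Int × PySem.Dict Int Int) elem =>
      if st.2.contains elem then
        let d' := st.2.modify elem 0 (· + 1)
        if d'.getD elem 0 = t then (st.1 + 1, d') else (st.1, d')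
      else (st.1, st.2.insert elem 1)) (count, d) l).1
    = count + (d.keys.countP (fun k => decide (d.getD k 0 < t ∧ t ≤ d.getD k 0 + (l.count k : Int))) : Int)
            + ((PySem.Set.ofList l).countP (fun k => !d.contains k && decide (t ≤ (l.count k : Int))) : Int) := by
  induction l with
  | nil =>
    intro count d _
    simp [PySem.Set.ofList]
  | cons x l' ih =>
    intro count d hnd
    rw [List.foldl_cons]
    have hcx : ((x :: l').count x : Int) = (l'.count x : Int) + 1 := by
      simp [List.count_cons]
    by_cases hc : d.contains x = true
    · -- elem already in the dict: the dict value is bumped and a crossing may be credited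
      have hxmem : x ∈ d.keys := (PySem.Dict.contains_iff_mem_keys d x).mp hc
      have hkeys : (d.modify x 0 (· + 1)).keys = d.keys := by
        rw [PySem.Dict.keys_modify, PySem.Dict.keys_insert_of_contains _ _ hc]
      have hnd' : (d.modify x 0 (· + 1)).keys.Nodup := by rw [hkeys]; exact hnd
      have hstep : (if (count, d).2.contains x = true then
            let d' := (count, d).2.modify x 0 (· + 1)
            if d'.getD x 0 = t then ((count, d).1 + 1, d') else ((count, d).1, d')
          else ((count, d).1, (count, d).2.insert x 1))
          = (if d.getD x 0 + 1 = t then (count + 1, d.modify x 0 (· + 1))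
             else (count, d.modify x 0 (· + 1))) := by
        simp only [hc, if_true, PySem.Dict.getD_modify_self]
      rw [hstep]
      have h2 : ((d.modify x 0 (· + 1)).keys.countP (fun k =>
            decide ((d.modify x 0 (· + 1)).getD k 0 < t ∧
              t ≤ (d.modify x 0 (· + 1)).getD k 0 + (l'.count k : Int))) : Int)
          = (d.keys.countP (fun k =>
              decide (d.getD k 0 < t ∧ t ≤ d.getD k 0 + ((x :: l').count k : Int))) : Int)
            + (if decide (d.getD x 0 + 1 < t ∧ t ≤ d.getD x 0 + 1 + (l'.count x : Int)) then 1 else 0)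
            - (if decide (d.getD x 0 < t ∧ t ≤ d.getD x 0 + ((x :: l').count x : Int)) then 1 else 0) := by
        rw [hkeys]
        have hshift := pv_countP_shift (l := d.keys) hnd hxmem
            (fun k => decide ((d.modify x 0 (· + 1)).getD k 0 < t ∧
              t ≤ (d.modify x 0 (· + 1)).getD k 0 + (l'.count k : Int)))
            (fun k => decide (d.getD k 0 < t ∧ t ≤ d.getD k 0 + ((x :: l').count k : Int)))
            (by intro y _ hyx
                simp [PySem.Dict.getD_modify, hyx, List.count_cons, Ne.symm hyx])
        rw [hshift]
        simp [PySem.Dict.getD_modify_self]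
      have h3 : ((PySem.Set.ofList (x :: l')).countP (fun k =>
            !d.contains k && decide (t ≤ ((x :: l').count k : Int))) : Int)
          = ((PySem.Set.ofList l').countP (fun k =>
              !(d.modify x 0 (· + 1)).contains k && decide (t ≤ (l'.count k : Int))) : Int) := by
        rw [PySem.Set.ofList_cons, List.countP_cons]
        have hpBx : (!d.contains x && decide (t ≤ ((x :: l').count x : Int))) = false := by
          simp [hc]
        have hcongr : ((PySem.Set.ofList l').discard x).countP (fun k =>
              !d.contains k && decide (t ≤ ((x :: l').count k : Int)))
            = ((PySem.Set.ofList l').discard x).countP (fun k =>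
              !(d.modify x 0 (· + 1)).contains k && decide (t ≤ (l'.count k : Int))) := by
          refine List.countP_congr ?_
          intro y hy
          obtain ⟨_, hyx⟩ := (PySem.Set.mem_discard _ x y).mp hy
          simp [PySem.Dict.contains_modify, hyx, List.count_cons, Ne.symm hyx]
        have hnewx : (fun k => !(d.modify x 0 (· + 1)).contains k &&
              decide (t ≤ (l'.count k : Int))) x = false := by
          simp [PySem.Dict.contains_modify]
        rw [hpBx, hcongr, pv_countP_discard hnewx]
        simp
      split_ifs with hcross
      · rw [ih (count + 1) _ hnd', h2, h3, hcx]
        simp only [decide_eq_true_eq]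
        split_ifs <;> omega
      · rw [ih count _ hnd', h2, h3, hcx]
        simp only [decide_eq_true_eq]
        split_ifs <;> omega
    · -- a fresh elem enters the dict with value 1 (no crossing: t ≥ 2)
      have hcf : d.contains x = false := by simpa using hc
      have hxnot : x ∉ d.keys := fun hmem => by
        simp [(PySem.Dict.contains_iff_mem_keys d x).mpr hmem] at hcf
      have hnd' : (d.insert x 1).keys.Nodup := PySem.Dict.nodup_keys_insert d x 1 hnd
      have hstep : (if (count, d).2.contains x = true then
            let d' := (count, d).2.modify x 0 (· + 1)
            if d'.getD x 0 = t then ((count, d).1 + 1, d') else ((count, d).1, d')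
          else ((count, d).1, (count, d).2.insert x 1)) = (count, d.insert x 1) := by
        simp only [hcf]
        simp
      rw [hstep, ih count _ hnd']
      have h2 : ((d.insert x 1).keys.countP (fun k =>
            decide ((d.insert x 1).getD k 0 < t ∧
              t ≤ (d.insert x 1).getD k 0 + (l'.count k : Int))) : Int)
          = (d.keys.countP (fun k =>
              decide (d.getD k 0 < t ∧ t ≤ d.getD k 0 + ((x :: l').count k : Int))) : Int)
            + (if decide (t ≤ 1 + (l'.count x : Int)) then 1 else 0) := by
        rw [PySem.Dict.keys_insert_of_not_contains d 1 hcf, List.countP_append]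
        have hmain : d.keys.countP (fun k =>
              decide ((d.insert x 1).getD k 0 < t ∧
                t ≤ (d.insert x 1).getD k 0 + (l'.count k : Int)))
            = d.keys.countP (fun k =>
              decide (d.getD k 0 < t ∧ t ≤ d.getD k 0 + ((x :: l').count k : Int))) := by
          refine List.countP_congr ?_
          intro y hy
          have hyx : y ≠ x := fun h => hxnot (h ▸ hy)
          simp [PySem.Dict.getD_insert, hyx, List.count_cons, Ne.symm hyx]
        rw [hmain]
        have hsing : List.countP (fun k =>
              decide ((d.insert x 1).getD k 0 < t ∧
                t ≤ (d.insert x 1).getD k 0 + (l'.count k : Int))) [x]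
            = if decide (t ≤ 1 + (l'.count x : Int)) then 1 else 0 := by
          rw [List.countP_cons, List.countP_nil]
          have hg1 : (d.insert x 1).getD x 0 = 1 := by simp
          simp only [hg1]
          by_cases hP : t ≤ 1 + (l'.count x : Int) <;> simp [hP] <;> omega
        rw [hsing]
        push_cast
        ring
      have h3 : ((PySem.Set.ofList (x :: l')).countP (fun k =>
            !d.contains k && decide (t ≤ ((x :: l').count k : Int))) : Int)
          = ((PySem.Set.ofList l').countP (fun k =>
              !(d.insert x 1).contains k && decide (t ≤ (l'.count k : Int))) : Int)
            + (if decide (t ≤ ((x :: l').count x : Int)) then 1 else 0) := by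
        rw [PySem.Set.ofList_cons, List.countP_cons]
        have hcongr : ((PySem.Set.ofList l').discard x).countP (fun k =>
              !d.contains k && decide (t ≤ ((x :: l').count k : Int)))
            = ((PySem.Set.ofList l').discard x).countP (fun k =>
              !(d.insert x 1).contains k && decide (t ≤ (l'.count k : Int))) := by
          refine List.countP_congr ?_
          intro y hy
          obtain ⟨_, hyx⟩ := (PySem.Set.mem_discard _ x y).mp hy
          simp [PySem.Dict.contains_insert, hyx, List.count_cons, Ne.symm hyx]
        have hnewx : (fun k => !(d.insert x 1).contains k &&
              decide (t ≤ (l'.count k : Int))) x = false := by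
          simp [PySem.Dict.contains_insert]
        have hpBx : (!d.contains x && decide (t ≤ ((x :: l').count x : Int)))
            = decide (t ≤ ((x :: l').count x : Int)) := by simp [hcf]
        rw [hcongr, pv_countP_discard hnewx, hpBx]
        push_cast
        by_cases hP : t ≤ ((x :: l').count x : Int) <;> simp [hP]
      rw [h2, h3, hcx]
      simp only [decide_eq_true_eq]
      split_ifs <;> omega

-- sorted tails only grow: dropping the leading run of x leaves no further x
theorem pv_not_mem_dropWhile (x : Int) : ∀ (l : List Int), (∀ y ∈ l, x ≤ y) →
    l.Pairwise (· ≤ ·) → x ∉ l.dropWhile (fun y => y == x) := by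
  intro l
  induction l with
  | nil => simp
  | cons h tl ih =>
    intro hge hpw
    by_cases hhx : (h == x) = true
    · rw [List.dropWhile_cons, if_pos (by simpa using hhx)]
      exact ih (fun y hy => hge y (List.mem_cons_of_mem _ hy)) hpw.of_cons
    · have hf : (h == x) = false := by simpa using hhx
      rw [List.dropWhile_cons, if_neg (by simp [hf])]
      intro hmem
      rcases List.mem_cons.mp hmem with heq | hmem'
      · simp [heq] at hhx
      · have hne : h ≠ x := by simpa using hf
        have hxh : x < h := lt_of_le_of_ne (hge h List.mem_cons_self) (Ne.symm hne)
        have := (List.pairwise_cons.mp hpw).1 x hmem'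
        omega

-- B's scan: on a ≤-sorted list, the number of runs longer than thr is the number of
-- distinct elements whose multiplicity exceeds thr
theorem pv_runCount_sorted (thr : Int) : ∀ (m : Nat) (s : List Int), s.length ≤ m →
    s.Pairwise (· ≤ ·) →
    pvRunCount thr s
      = ((PySem.Set.ofList s).countP (fun k => decide (thr < (s.count k : Int))) : Int) := by
  intro m
  induction m with
  | zero =>
    intro s hl _
    have hs : s = [] := List.eq_nil_of_length_eq_zero (Nat.le_zero.mp hl)
    subst hs
    rw [pvRunCount]
    simp [PySem.Set.ofList]
  | succ m ih =>
    intro s hl hp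
    match s with
    | [] =>
      rw [pvRunCount]
      simp [PySem.Set.ofList]
    | x :: rest =>
      -- the first run is x together with takeWhile (== x) rest; the tail of the scan is dropWhile
      have hxle : ∀ y ∈ rest, x ≤ y := (List.pairwise_cons.mp hp).1
      have htd : rest.takeWhile (fun y => y == x) ++ rest.dropWhile (fun y => y == x) = rest :=
        List.takeWhile_append_dropWhile
      have hxt : ∀ y ∈ rest.takeWhile (fun y => y == x), y = x := by
        intro y hy
        simpa using List.mem_takeWhile_imp hy
      have hdsub : (rest.dropWhile (fun y => y == x)).Sublist rest := List.dropWhile_sublist _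
      have hdpw : (rest.dropWhile (fun y => y == x)).Pairwise (· ≤ ·) :=
        hp.of_cons.sublist hdsub
      have hxnd : x ∉ rest.dropWhile (fun y => y == x) :=
        pv_not_mem_dropWhile x rest hxle hp.of_cons
      have hcountx : (x :: rest).count x = (rest.takeWhile (fun y => y == x)).length + 1 := by
        have h1 : (rest.takeWhile (fun y => y == x)).count x
            = (rest.takeWhile (fun y => y == x)).length :=
          List.count_eq_length.mpr (fun b hb => (hxt b hb).symm)
        have h2 : (rest.dropWhile (fun y => y == x)).count x = 0 :=
          List.count_eq_zero.mpr hxnd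
        have h3 : rest.count x = (rest.takeWhile (fun y => y == x)).length := by
          conv_lhs => rw [← htd]
          rw [List.count_append, h1, h2]
          omega
        simp [List.count_cons, h3]
      have hcountk : ∀ k, k ≠ x →
          (x :: rest).count k = (rest.dropWhile (fun y => y == x)).count k := by
        intro k hk
        have h1 : (rest.takeWhile (fun y => y == x)).count k = 0 :=
          List.count_eq_zero.mpr (fun hmem => hk (hxt k hmem))
        have h3 : rest.count k = (rest.dropWhile (fun y => y == x)).count k := by
          conv_lhs => rw [← htd]
          rw [List.count_append, h1]
          omega
        simp [List.count_cons, hk, Ne.symm hk, h3]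
      -- the distinct elements of s are x plus the distinct elements of the dropped tail
      have hsetperm : (PySem.Set.ofList (x :: rest)).Perm
          (x :: PySem.Set.ofList (rest.dropWhile (fun y => y == x))) := by
        refine (List.perm_ext_iff_of_nodup (PySem.Set.nodup_ofList _) ?_).mpr ?_
        · exact List.nodup_cons.mpr ⟨by simpa [PySem.Set.mem_ofList] using hxnd,
            PySem.Set.nodup_ofList _⟩
        · intro a
          simp only [PySem.Set.mem_ofList, List.mem_cons]
          constructor
          · rintro (rfl | ha)
            · exact Or.inl rfl
            · rw [← htd] at ha
              rcases List.mem_append.mp ha with h1 | h1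
              · exact Or.inl (hxt a h1)
              · exact Or.inr (by simpa [PySem.Set.mem_ofList] using h1)
          · rintro (rfl | ha)
            · exact Or.inl rfl
            · refine Or.inr ?_
              rw [← htd]
              exact List.mem_append.mpr (Or.inr (by simpa [PySem.Set.mem_ofList] using ha))
      have hstep : pvRunCount thr (x :: rest)
          = (if thr < (((rest.takeWhile (fun y => y == x)).length + 1 : Nat) : Int) then 1 else 0)
            + pvRunCount thr (rest.dropWhile (fun y => y == x)) := by
        rw [pvRunCount]
      have hdlen : (rest.dropWhile (fun y => y == x)).length ≤ m := by
        have := hdsub.length_le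
        simp at hl
        omega
      rw [hstep, ih _ hdlen hdpw, hsetperm.countP_eq, List.countP_cons]
      have hcongr : (PySem.Set.ofList (rest.dropWhile (fun y => y == x))).countP
            (fun k => decide (thr < ((x :: rest).count k : Int)))
          = (PySem.Set.ofList (rest.dropWhile (fun y => y == x))).countP
            (fun k => decide (thr < ((rest.dropWhile (fun y => y == x)).count k : Int))) := by
        refine List.countP_congr ?_
        intro z hz
        have hzmem : z ∈ rest.dropWhile (fun y => y == x) :=
          (PySem.Set.mem_ofList (rest.dropWhile (fun y => y == x)) z).mp hz
        have hzx : z ≠ x := fun h => hxnd (h ▸ hzmem)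
        rw [hcountk z hzx]
      rw [hcongr]
      have hpx : decide (thr < ((x :: rest).count x : Int))
          = decide (thr < (((rest.takeWhile (fun y => y == x)).length + 1 : Nat) : Int)) := by
        rw [hcountx]
      rw [hpx]
      push_cast
      by_cases hP : thr < ((rest.takeWhile (fun y => y == x)).length : Int) + 1 <;>
        simp [hP] <;> ring

-- transfer the distinct-heavy count from mas to sorted(mas)
theorem pv_altB (mas : List Int) (n : Int) :
    pvRunCount (PySem.Int.floordiv n 4) (PySem.List.sorted mas (fun x => x) false)
      = ((PySem.Set.ofList mas).countP
          (fun k => decide (PySem.Int.floordiv n 4 < (mas.count k : Int))) : Int) := by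
  have hperm : (PySem.List.sorted mas (fun x => x) false).Perm mas :=
    PySem.List.sorted_perm mas (fun x => x) false
  have hpw : (PySem.List.sorted mas (fun x => x) false).Pairwise (· ≤ ·) := by
    simpa using PySem.List.sorted_pairwise (xs := mas) (key := fun x => x)
  rw [pv_runCount_sorted (PySem.Int.floordiv n 4)
    (PySem.List.sorted mas (fun x => x) false).length _ le_rfl hpw]
  have hsetperm : (PySem.Set.ofList (PySem.List.sorted mas (fun x => x) false)).Perm
      (PySem.Set.ofList mas) := by
    refine (List.perm_ext_iff_of_nodup (PySem.Set.nodup_ofList _) (PySem.Set.nodup_ofList _)).mpr ?_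
    intro a
    simp [PySem.Set.mem_ofList, hperm.mem_iff]
  rw [hsetperm.countP_eq]
  congr 1
  refine List.countP_congr ?_
  intro y _
  rw [hperm.count_eq]

theorem pv_get0 (a : Int) (l : List Int) : PySem.List.pyGet? (a :: l) 0 = some a := by
  simp [PySem.List.pyGet?, PySem.List.pyIdx?]
theorem pv_get1 (a b : Int) (l : List Int) : PySem.List.pyGet? (a :: b :: l) 1 = some b := by
  simp [pysem]
theorem pv_get2 (a b c : Int) (l : List Int) : PySem.List.pyGet? (a :: b :: c :: l) 2 = some c := by
  simp [pysem]

theorem find_three_dimensional_elements_spec : Claim_unchanged_find_three_dimensional_elements := by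
  intro mas n hdom hpre hnD
  show find_three_dimensional_elements mas n = find_three_dimensional_elements_alt mas n
  by_cases h3 : n = 3
  · -- the guard branch: both programs look only at the first three elements
    subst h3
    rcases mas with _ | ⟨a, _ | ⟨b, _ | ⟨c, rest⟩⟩⟩
    · have h := (hpre rfl).1; simp at h
    · have h := (hpre rfl).1; simp at h
    · have hab : a = b := by
        have h := (hpre rfl).2
        simpa using h
      subst hab
      have hslice : PySem.List.slice [a, a] none (some 3) = [a, a] :=
        PySem.List.slice_to _ (by norm_num)
      simp [find_three_dimensional_elements, find_three_dimensional_elements_alt, hslice,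
        pv_get0, pv_get1, pv_get2, PySem.Set.ofList, PySem.Set.add, PySem.Set.contains, PySem.Set.len,
        PySem.Set.empty]
    · have hD' : ¬(¬a = b ∧ ¬a = c ∧ b = c) := by
        rintro ⟨h1', h2', h3'⟩
        refine hnD ⟨rfl, by simp, ?_, ?_, ?_⟩ <;> simpa using ‹_›
      by_cases hab : a = b
      · subst hab
        by_cases hac : a = c
        · subst hac
          have hslice : PySem.List.slice (a :: a :: a :: rest) none (some 3) = [a, a, a] :=
            PySem.List.slice_to _ (by norm_num)
          simp [find_three_dimensional_elements, find_three_dimensional_elements_alt, hslice,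
            pv_get0, pv_get1, pv_get2, PySem.Set.ofList, PySem.Set.add, PySem.Set.contains,
            PySem.Set.len, PySem.Set.empty]
        · have hslice : PySem.List.slice (a :: a :: c :: rest) none (some 3) = [a, a, c] :=
            PySem.List.slice_to _ (by norm_num)
          simp [find_three_dimensional_elements, find_three_dimensional_elements_alt, hslice,
            pv_get0, pv_get1, pv_get2, PySem.Set.ofList, PySem.Set.add, PySem.Set.contains,
            PySem.Set.len, PySem.Set.empty, hac, Ne.symm hac]
      · by_cases hac : a = c
        · subst hac
          have hslice : PySem.List.slice (a :: b :: a :: rest) none (some 3) = [a, b, a] :=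
            PySem.List.slice_to _ (by norm_num)
          simp [find_three_dimensional_elements, find_three_dimensional_elements_alt, hslice,
            pv_get0, pv_get1, pv_get2, PySem.Set.ofList, PySem.Set.add, PySem.Set.contains,
            PySem.Set.len, PySem.Set.empty, hab, Ne.symm hab]
        · have hbc : ¬b = c := fun h => hD' ⟨hab, hac, h⟩
          have hslice : PySem.List.slice (a :: b :: c :: rest) none (some 3) = [a, b, c] :=
            PySem.List.slice_to _ (by norm_num)
          simp [find_three_dimensional_elements, find_three_dimensional_elements_alt, hslice,
            pv_get0, pv_get1, pv_get2, PySem.Set.ofList, PySem.Set.add, PySem.Set.contains,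
            PySem.Set.len, PySem.Set.empty, hab, Ne.symm hab, hac, Ne.symm hac, hbc, Ne.symm hbc]
  · by_cases h5 : n < 5
    · simp [find_three_dimensional_elements, find_three_dimensional_elements_alt, h3, h5]
    · -- the real counting loop: n ≥ 5, so the crossing threshold n//4 + 1 is at least 2
      have hfd : 1 ≤ PySem.Int.floordiv n 4 :=
        (PySem.Int.le_floordiv_iff_mul_le (by norm_num)).mpr (by omega)
      have ht : 2 ≤ PySem.Int.floordiv n 4 + 1 := by omega
      simp only [find_three_dimensional_elements, find_three_dimensional_elements_alt,
        if_neg h3, if_neg h5]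
      rw [pv_loopA (PySem.Int.floordiv n 4 + 1) ht mas 0 PySem.Dict.empty
        PySem.Dict.nodup_keys_empty]
      rw [pv_altB mas n]
      simp only [PySem.Dict.keys_empty, List.countP_nil, PySem.Dict.contains_empty,
        Bool.not_false, Bool.true_and, Nat.cast_zero, add_zero, zero_add]
      have hcong : (PySem.Set.ofList mas).countP
            (fun k => decide (PySem.Int.floordiv n 4 + 1 ≤ (mas.count k : Int)))
          = (PySem.Set.ofList mas).countP
            (fun k => decide (PySem.Int.floordiv n 4 < (mas.count k : Int))) := by
        refine List.countP_congr ?_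
        intro y _
        simp only [decide_eq_true_eq]
        omega
      rw [hcong]

theorem find_three_dimensional_elements_tight : Claim_exact_find_three_dimensional_elements := by
  intro mas n hdom hpre hD
  obtain ⟨h3, hlen, hab, hac, hbc⟩ := hD
  subst h3
  rcases mas with _ | ⟨a, _ | ⟨b, _ | ⟨c, rest⟩⟩⟩
  · simp at hlen
  · simp at hlen
  · simp at hlen
  · simp only [List.getD_cons_zero, List.getD_cons_succ] at hab hac hbc
    subst hbc
    have hslice : PySem.List.slice (a :: b :: b :: rest) none (some 3) = [a, b, b] :=
      PySem.List.slice_to _ (by norm_num)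
    simp [find_three_dimensional_elements, find_three_dimensional_elements_alt, hslice,
      pv_get0, pv_get1, pv_get2, PySem.Set.ofList, PySem.Set.add, PySem.Set.contains,
      PySem.Set.len, PySem.Set.empty, hab, Ne.symm hab]

-- ===== VERDICT (by name: the statement is the Claim_ definition above) =====
theorem find_three_dimensional_elements_changed : Claim_changed_find_three_dimensional_elements := by
  unfold Claim_changed_find_three_dimensional_elements; decide
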